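-- pv_equiv track=rewrite | github.com/alexlcy/mahjongAI | MajhongAI/mahjong/exploration/methods.py | decide_discard_by_rule
-- ===== SOURCE A (Python) =====
-- def decide_discard_by_rule(player):
--     """
--     When there are no valid decision made by AI and no discard based on color.
--     The discard will be conducted using the same naive rule as the rule agent.
--
--     Args:
--         player ():
--
--     Returns:
--
--     """
--     # Discard based on rule
--     cards = [0] * 30
--     for card in player['hands']:
--         cards[card] += 1
--
--     for card in range(30):
--         if cards[card] == 1:
--             return card
--     for card in range(30):
--         if cards[card] == 2:
--             return card
-- ===== SOURCE B (Python) =====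
-- def decide_discard_by_rule(player):
--     # Single pass over the 30 counts: return the first singleton immediately,
--     # remember the first pair, return it (or None) after the loop.
--     cards = [0] * 30
--     for card in player['hands']:
--         cards[card] += 1
--
--     first_pair = None
--     for card in range(30):
--         if cards[card] == 1:
--             return card
--         elif cards[card] == 2 and first_pair is None:
--             first_pair = card
--     return first_pair
-- ===== Notes on version B (the rewrite author's own statement) =====
-- stated objective: alternative
-- what changed: Replaced A's two sequential scans over the 30 counters (first for a singleton, then for a pair) by a single scan that returns a singleton immediately and carries the first pair seen in an accumulator.
import Mathlib
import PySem

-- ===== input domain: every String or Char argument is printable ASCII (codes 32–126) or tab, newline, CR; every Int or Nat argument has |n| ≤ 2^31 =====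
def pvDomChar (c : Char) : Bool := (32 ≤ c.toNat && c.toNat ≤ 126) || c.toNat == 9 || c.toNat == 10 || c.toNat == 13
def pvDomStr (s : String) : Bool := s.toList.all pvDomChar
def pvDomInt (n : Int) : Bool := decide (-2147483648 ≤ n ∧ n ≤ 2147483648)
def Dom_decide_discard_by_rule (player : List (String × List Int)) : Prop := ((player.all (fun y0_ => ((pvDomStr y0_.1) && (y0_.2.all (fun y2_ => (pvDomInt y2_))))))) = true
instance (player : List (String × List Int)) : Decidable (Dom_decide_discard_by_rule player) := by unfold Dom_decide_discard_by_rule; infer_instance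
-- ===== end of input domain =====

-- B replaces A's two sequential scans of the 30 counters by one scan carrying the
-- first pair in an accumulator (objective: alternative decomposition, same cost).

-- ===== PORT A =====
-- cards = [0]*30; for card in hands: cards[card] += 1   (none = IndexError, excluded by Pre_)
def pvCount (hands : List Int) : Option (List Int) :=
  hands.foldl
    (fun acc card =>
      acc.bind (fun cards =>
        (PySem.List.pyGet? cards card).bind (fun v =>
          PySem.List.pySet? cards card (v + 1))))
    (some (List.replicate 30 0))

def decide_discard_by_rule (player : List (String × List Int)) : Option Int :=
  match PySem.Dict.get? (PySem.Dict.ofList player) "hands" with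
  | none => none        -- KeyError; excluded by Pre_
  | some hands =>
    match pvCount hands with
    | none => none      -- IndexError; excluded by Pre_
    | some cards =>
      match (PySem.List.pyRange 0 30 1).find?
              (fun card => decide (PySem.List.pyGetD cards card 0 = 1)) with
      | some card => some card
      | none =>
        (PySem.List.pyRange 0 30 1).find?
          (fun card => decide (PySem.List.pyGetD cards card 0 = 2))

-- ===== PORT B =====
-- single pass: return on a singleton, record the first pair, return it at the end
def pvLoopB (cards : List Int) : List Int → Option Int → Option Int
  | [], firstPair => firstPair
  | card :: rest, firstPair =>
    if PySem.List.pyGetD cards card 0 = 1 then some card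
    else if PySem.List.pyGetD cards card 0 = 2 ∧ firstPair = none then
      pvLoopB cards rest (some card)
    else
      pvLoopB cards rest firstPair

def decide_discard_by_rule_alt (player : List (String × List Int)) : Option Int :=
  match PySem.Dict.get? (PySem.Dict.ofList player) "hands" with
  | none => none
  | some hands =>
    match pvCount hands with
    | none => none
    | some cards => pvLoopB cards (PySem.List.pyRange 0 30 1) none

-- ===== PRECONDITION & SPEC =====
-- Pre_: the dict has a 'hands' key and every card is a valid index into the 30-slot
-- list (Python's negative indexing included); otherwise A raises KeyError/IndexError.
def Pre_decide_discard_by_rule (player : List (String × List Int)) : Prop :=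
  (PySem.Dict.get? (PySem.Dict.ofList player) "hands").isSome = true ∧
  ∀ c ∈ (PySem.Dict.get? (PySem.Dict.ofList player) "hands").getD [], -30 ≤ c ∧ c < 30
instance (player : List (String × List Int)) : Decidable (Pre_decide_discard_by_rule player) := by
  unfold Pre_decide_discard_by_rule; infer_instance

def pvWitness_decide_discard_by_rule : (List (String × List Int)) :=
  [("hands", [1, 2, 2, 5])]

def Spec_decide_discard_by_rule (player : List (String × List Int)) (out : Option Int) : Prop := out = decide_discard_by_rule_alt player
instance (player : List (String × List Int)) (out : Option Int) : Decidable (Spec_decide_discard_by_rule player out) := by unfold Spec_decide_discard_by_rule; infer_instance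

-- ===== CLAIM (what is proved, stated in full; the proofs are below) =====
def Claim_equal_decide_discard_by_rule : Prop := ∀ (player : List (String × List Int)), Dom_decide_discard_by_rule player → Pre_decide_discard_by_rule player → Spec_decide_discard_by_rule player (decide_discard_by_rule player)

-- ===== LEMMAS AND PROOFS =====

-- B's single pass equals: first singleton, else the carried pair, else first pair.
lemma pvLoopB_eq (cards : List Int) (l : List Int) (fp : Option Int) :
    pvLoopB cards l fp =
      (l.find? (fun card => decide (PySem.List.pyGetD cards card 0 = 1))).or
        (fp.or (l.find? (fun card => decide (PySem.List.pyGetD cards card 0 = 2)))) := by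
  induction l generalizing fp with
  | nil => simp [pvLoopB]
  | cons c rest ih =>
    simp only [pvLoopB, List.find?]
    by_cases h1 : PySem.List.pyGetD cards c 0 = 1
    · simp [h1]
    · by_cases h2 : PySem.List.pyGetD cards c 0 = 2
      · cases fp <;> simp [h2, ih]
      · simp [h1, h2, ih]

-- ===== VERDICT (by name: the statement is the Claim_ definition above) =====
theorem decide_discard_by_rule_spec : Claim_equal_decide_discard_by_rule := by
  intro player _ _
  unfold Spec_decide_discard_by_rule decide_discard_by_rule decide_discard_by_rule_alt
  rcases hg : PySem.Dict.get? (PySem.Dict.ofList player) "hands" with _ | hands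
  · rfl
  · rcases hc : pvCount hands with _ | cards
    · simp only [hc]
    · simp only [hc, pvLoopB_eq, Option.none_or]
      rcases hf : (PySem.List.pyRange 0 30 1).find?
          (fun card => decide (PySem.List.pyGetD cards card 0 = 1)) with _ | c
      · rfl
      · rfl
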